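-- pv_equiv track=rewrite | github.com/vcutrona/nest | utils/functions.py | strings_subsequences
-- ===== SOURCE A (Python) =====
-- from typing import List, Iterable
-- from typing import Tuple, Dict, Set
--
-- def strings_subsequences(strings: List[str], max_subseq_len) -> Tuple[Dict[str, List[str]], Set[str]]:
--     """
--     Given a list of strings, this method computes all the subsequences of different lengths, up to ``max_subseq_len``.
--     Returns a tuple with a Dict(label: List(subsequences)) to preserve the mapping label-subsequence,
--     and the set with all the subsequences.
--     :param strings: a list of strings
--     :param max_subseq_len: length of the longest subsequence to compute
--     :return: a tuple (<subsequences_dict>, <subsequences_set>)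
--     """
--     subsequences = {}
--     subsequences_set = set()
--     for string in strings:
--         tokens = string.split()
--         subsequences[string] = [" ".join(tokens[:i + 1])
--                                 for i in reversed(range(min(max_subseq_len, len(tokens))))]
--         subsequences_set.update(subsequences[string])
--     return subsequences, subsequences_set
-- ===== SOURCE B (Python) =====
-- def strings_subsequences(strings, max_subseq_len):
--     subsequences = {}
--     subsequences_set = set()
--     for string in strings:
--         prefixes = []
--         acc = None
--         for tok in string.split():
--             if len(prefixes) >= max_subseq_len:
--                 break
--             acc = tok if acc is None else acc + " " + tok
--             prefixes.append(acc)
--         prefixes.reverse()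
--         subsequences[string] = prefixes
--         subsequences_set.update(prefixes)
--     return subsequences, subsequences_set
-- ===== Notes on version B (the rewrite author's own statement) =====
-- stated objective: alternative
-- what changed: Each prefix is built incrementally by extending a running accumulator string token by token (with an early break once max_subseq_len prefixes exist), then the list is reversed, instead of re-joining tokens[:i+1] from scratch for every i of a reversed range.
import Mathlib
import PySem

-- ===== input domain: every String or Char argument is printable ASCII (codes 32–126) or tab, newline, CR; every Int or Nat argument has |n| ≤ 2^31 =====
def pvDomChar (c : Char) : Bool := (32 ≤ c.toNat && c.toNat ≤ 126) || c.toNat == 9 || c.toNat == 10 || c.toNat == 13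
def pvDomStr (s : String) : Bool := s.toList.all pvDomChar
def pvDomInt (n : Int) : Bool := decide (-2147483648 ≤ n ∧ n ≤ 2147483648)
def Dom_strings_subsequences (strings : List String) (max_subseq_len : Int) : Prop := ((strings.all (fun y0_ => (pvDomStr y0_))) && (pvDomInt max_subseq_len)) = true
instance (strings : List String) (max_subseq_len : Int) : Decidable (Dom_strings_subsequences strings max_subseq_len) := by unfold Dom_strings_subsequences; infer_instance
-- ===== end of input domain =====

-- B builds each prefix by extending a running accumulator string instead of re-joining tokens[:i+1] for every i (alternative decomposition, same results).

-- ===== PORT A =====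
def strings_subsequences (strings : List String) (max_subseq_len : Int) : (List (String × List String)) × List String :=
  let st := strings.foldl
    (fun (st : PySem.Dict String (List String) × PySem.Set String) string =>
      let tokens := PySem.Str.split₀ string
      let subs := ((PySem.List.pyRange 0 (min max_subseq_len (tokens.length : Int)) 1).reverse).map
        (fun i => PySem.Str.join " " (PySem.List.slice tokens none (some (i + 1))))
      (st.1.insert string subs, PySem.Set.update st.2 subs))
    (PySem.Dict.empty, PySem.Set.empty)
  (st.1.items, st.2)

-- ===== PORT B =====
-- the inner token loop of Source B: prefixes accumulator + running prefix string, break once max_subseq_len prefixes exist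
def pvBLoop (m : Int) : List String → List String → Option String → List String
  | [], prefixes, _ => prefixes
  | tok :: rest, prefixes, acc =>
    if m ≤ (prefixes.length : Int) then prefixes
    else
      let a := match acc with
        | none => tok
        | some s => s ++ " " ++ tok
      pvBLoop m rest (prefixes ++ [a]) (some a)

def strings_subsequences_alt (strings : List String) (max_subseq_len : Int) : (List (String × List String)) × List String :=
  let st := strings.foldl
    (fun (st : PySem.Dict String (List String) × PySem.Set String) string =>
      let prefixes := (pvBLoop max_subseq_len (PySem.Str.split₀ string) [] none).reverse
      (st.1.insert string prefixes, PySem.Set.update st.2 prefixes))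
    (PySem.Dict.empty, PySem.Set.empty)
  (st.1.items, st.2)

-- ===== PRECONDITION & SPEC =====
def Spec_strings_subsequences (strings : List String) (max_subseq_len : Int) (out : (List (String × List String)) × List String) : Prop := out = strings_subsequences_alt strings max_subseq_len
instance (strings : List String) (max_subseq_len : Int) (out : (List (String × List String)) × List String) : Decidable (Spec_strings_subsequences strings max_subseq_len out) := by unfold Spec_strings_subsequences; infer_instance

-- ===== CLAIM (what is proved, stated in full; the proofs are below) =====
def Claim_equal_strings_subsequences : Prop := ∀ (strings : List String) (max_subseq_len : Int), Dom_strings_subsequences strings max_subseq_len → Spec_strings_subsequences strings max_subseq_len (strings_subsequences strings max_subseq_len)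

-- ===== LEMMAS AND PROOFS =====

-- spec of the inner loop from a non-empty running prefix s, producing at most c more prefixes
def pvSpecFrom (s : String) : List String → Nat → List String
  | _, 0 => []
  | [], _ + 1 => []
  | t :: rest, c + 1 => (s ++ " " ++ t) :: pvSpecFrom (s ++ " " ++ t) rest c

theorem chars_join_snoc (sep : List Char) (ps : List (List Char)) (hp : ps ≠ []) (q : List Char) :
    PySem.Chars.join sep (ps ++ [q]) = PySem.Chars.join sep ps ++ sep ++ q := by
  induction ps with
  | nil => exact absurd rfl hp
  | cons p ps ih =>
    cases ps with
    | nil => simp [PySem.Chars.join, List.intercalate]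
    | cons r rs =>
      simp only [List.cons_append] at ih ⊢
      rw [PySem.Chars.join_cons_cons, ih (by simp), PySem.Chars.join_cons_cons]
      simp [List.append_assoc]

theorem join_snoc (front : List String) (hf : front ≠ []) (t : String) :
    PySem.Str.join " " (front ++ [t]) = PySem.Str.join " " front ++ " " ++ t := by
  apply String.toList_inj.mp
  simp only [String.toList_append, PySem.Str.toList_join, List.map_append, List.map_cons,
    List.map_nil]
  exact chars_join_snoc _ _ (by simpa using hf) _

theorem join_singleton' (t : String) : PySem.Str.join " " [t] = t := by
  apply String.toList_inj.mp
  simp [PySem.Str.toList_join, PySem.Chars.join, List.intercalate]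

theorem pvSpecFrom_nil (s : String) (c : Nat) : pvSpecFrom s [] c = [] := by
  cases c <;> simp [pvSpecFrom]

theorem pvBLoop_some (m : Int) (tokens : List String) :
    ∀ (prefixes : List String) (s : String),
    pvBLoop m tokens prefixes (some s) = prefixes ++ pvSpecFrom s tokens (m - prefixes.length).toNat := by
  induction tokens with
  | nil => intro prefixes s; simp [pvBLoop, pvSpecFrom_nil]
  | cons t rest ih =>
    intro prefixes s
    by_cases h : m ≤ (prefixes.length : Int)
    · have : (m - prefixes.length).toNat = 0 := by omega
      simp [pvBLoop, h, this, pvSpecFrom]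
    · have hc : (m - prefixes.length).toNat = (m - prefixes.length - 1).toNat + 1 := by omega
      rw [pvBLoop, if_neg h]
      rw [ih (prefixes ++ [s ++ " " ++ t]) (s ++ " " ++ t)]
      rw [hc, pvSpecFrom]
      simp [List.append_assoc]
      congr 1
      omega

theorem pvSpecFrom_join (rest : List String) :
    ∀ (front : List String) (c : Nat), front ≠ [] →
    pvSpecFrom (PySem.Str.join " " front) rest c
      = (List.range (min c rest.length)).map
          (fun j => PySem.Str.join " " (front ++ rest.take (j + 1))) := by
  induction rest with
  | nil => intro front c _; simp [pvSpecFrom_nil]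
  | cons t rs ih =>
    intro front c hf
    cases c with
    | zero => simp [pvSpecFrom]
    | succ c =>
      have hmin : min (c + 1) (t :: rs).length = min c rs.length + 1 := by
        simp only [List.length_cons]; omega
      rw [hmin, List.range_succ_eq_map, List.map_cons, List.map_map]
      rw [pvSpecFrom, ← join_snoc front hf t, ih (front ++ [t]) c (by simp)]
      refine congrArg₂ List.cons ?_ ?_
      · simp
      · apply List.map_congr_left
        intro j _
        simp [Function.comp, List.append_assoc]

theorem pvBLoop_eq_range (m : Int) (tokens : List String) :
    pvBLoop m tokens [] none
      = (PySem.List.pyRange 0 (min m (tokens.length : Int)) 1).map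
          (fun i => PySem.Str.join " " (PySem.List.slice tokens none (some (i + 1)))) := by
  cases tokens with
  | nil =>
    rw [PySem.List.pyRange_one_eq_nil (by simp only [List.length_nil, Int.natCast_zero]; omega)]
    simp [pvBLoop]
  | cons t rest =>
    by_cases hm : m ≤ 0
    · rw [PySem.List.pyRange_one_eq_nil (by simp [List.length_cons]; omega)]
      simp [pvBLoop, hm]
    · rw [not_le] at hm
      rw [pvBLoop, if_neg (by simpa using hm)]
      have h1 : pvBLoop m rest [t] (some t)
          = [t] ++ pvSpecFrom t rest (m - 1).toNat := by
        simpa using pvBLoop_some m rest [t] t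
      show pvBLoop m rest [t] (some t) = _
      have h2 := pvSpecFrom_join rest [t] (m - 1).toNat (by simp)
      rw [join_singleton'] at h2
      rw [h1, h2, PySem.List.pyRange_one]
      have hN : (min m ((t :: rest).length : Int) - 0).toNat
          = min (m - 1).toNat rest.length + 1 := by
        simp only [List.length_cons]; omega
      rw [hN, List.range_succ_eq_map, List.map_cons, List.map_map, List.map_cons, List.map_map]
      refine congrArg₂ List.cons ?_ ?_
      · rw [PySem.List.slice_to _ (by norm_num)]
        norm_num [join_singleton']
      · apply List.map_congr_left
        intro j _
        have : PySem.List.slice (t :: rest) none (some ((0 : Int) + (j + 1) + 1))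
            = (t :: rest).take (j + 2) := by
          rw [PySem.List.slice_to _ (by omega)]
          congr 1
          omega
        simp only [Function.comp, Nat.succ_eq_add_one, Nat.cast_add, Nat.cast_one]
        rw [this]
        simp [List.take_succ_cons]

theorem perString (m : Int) (s : String) :
    ((PySem.List.pyRange 0 (min m ((PySem.Str.split₀ s).length : Int)) 1).reverse).map
        (fun i => PySem.Str.join " " (PySem.List.slice (PySem.Str.split₀ s) none (some (i + 1))))
      = (pvBLoop m (PySem.Str.split₀ s) [] none).reverse := by
  rw [pvBLoop_eq_range, List.map_reverse]

-- ===== VERDICT (by name: the statement is the Claim_ definition above) =====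
theorem strings_subsequences_spec : Claim_equal_strings_subsequences := by
  intro strings m _
  unfold Spec_strings_subsequences strings_subsequences strings_subsequences_alt
  have : (fun (st : PySem.Dict String (List String) × PySem.Set String) (string : String) =>
      let tokens := PySem.Str.split₀ string
      let subs := ((PySem.List.pyRange 0 (min m (tokens.length : Int)) 1).reverse).map
        (fun i => PySem.Str.join " " (PySem.List.slice tokens none (some (i + 1))))
      (st.1.insert string subs, PySem.Set.update st.2 subs))
    = (fun (st : PySem.Dict String (List String) × PySem.Set String) (string : String) =>
      let prefixes := (pvBLoop m (PySem.Str.split₀ string) [] none).reverse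
      (st.1.insert string prefixes, PySem.Set.update st.2 prefixes)) := by
    funext st s
    simp only []
    rw [perString m s]
  simp only []
  rw [this]
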